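-- pv_equiv track=rewrite | github.com/sarev17/TCC---corretor | app/services/segmentation_service.py | _build_regions
-- ===== SOURCE A (Python) =====
-- from typing import List, Dict
--
-- def _build_regions(positions: List[int], x_offset: int, width: int, height: int) -> List[Dict]:
--     regions = []
--
--     if not positions:
--         return regions
--
--     for i, y_start in enumerate(positions):
--
--         if i < len(positions) - 1:
--             y_end = positions[i + 1]
--         else:
--             y_end = height
--
--         regions.append({
--             "x": int(x_offset),
--             "y": int(y_start),
--             "w": int(width),
--             "h": int(y_end - y_start)
--         })
--
--     return regions
-- ===== SOURCE B (Python) =====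
-- def _build_regions(positions, x_offset, width, height):
--     regions = []
--     bound = height
--     for y in reversed(positions):
--         regions.append({
--             "x": int(x_offset),
--             "y": int(y),
--             "w": int(width),
--             "h": int(bound - y)
--         })
--         bound = y
--     regions.reverse()
--     return regions
-- ===== Notes on version B (the rewrite author's own statement) =====
-- stated objective: alternative
-- what changed: Traverses positions in reverse carrying the next region boundary in an accumulator (seeded with height), then reverses the result; this removes the enumerate index, the positions[i+1] successor lookup and the i < len-1 branch entirely.
import Mathlib
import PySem

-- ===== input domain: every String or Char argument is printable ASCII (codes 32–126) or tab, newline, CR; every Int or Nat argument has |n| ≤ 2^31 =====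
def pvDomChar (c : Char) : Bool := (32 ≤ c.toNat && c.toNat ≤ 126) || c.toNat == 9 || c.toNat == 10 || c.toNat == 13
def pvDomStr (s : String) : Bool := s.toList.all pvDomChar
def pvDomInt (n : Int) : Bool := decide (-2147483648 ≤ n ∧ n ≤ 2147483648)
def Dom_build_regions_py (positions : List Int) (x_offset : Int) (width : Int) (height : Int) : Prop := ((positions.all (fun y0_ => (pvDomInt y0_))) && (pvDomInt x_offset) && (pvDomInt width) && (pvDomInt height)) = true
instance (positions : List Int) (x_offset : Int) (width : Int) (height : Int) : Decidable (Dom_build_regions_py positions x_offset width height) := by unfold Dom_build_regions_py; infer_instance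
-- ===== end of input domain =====

-- ===== PORT A =====
-- B traverses positions in reverse carrying the next boundary in an accumulator (seeded
-- with height) and reverses the result, instead of A's enumerate with an indexed successor
-- lookup and an i < len-1 branch; the return values are proved equal below.
def build_regions_py (positions : List Int) (x_offset : Int) (width : Int) (height : Int) : List (List (String × Int)) :=
  if positions = [] then []
  else
    (PySem.List.enumerate positions 0).foldl
      (fun regions iy =>
        let y_end : Int :=
          if iy.1 < (positions.length : Int) - 1 then PySem.List.pyGetD positions (iy.1 + 1) 0
          else height
        regions ++ [[("x", x_offset), ("y", iy.2), ("w", width), ("h", y_end - iy.2)]])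
      []

-- ===== PORT B =====
def build_regions_py_alt (positions : List Int) (x_offset : Int) (width : Int) (height : Int) : List (List (String × Int)) :=
  let st := positions.reverse.foldl
    (fun (s : Int × List (List (String × Int))) y =>
      (y, s.2 ++ [[("x", x_offset), ("y", y), ("w", width), ("h", s.1 - y)]]))
    (height, [])
  st.2.reverse

-- ===== PRECONDITION & SPEC =====
def Spec_build_regions_py (positions : List Int) (x_offset : Int) (width : Int) (height : Int) (out : List (List (String × Int))) : Prop := out = build_regions_py_alt positions x_offset width height
instance (positions : List Int) (x_offset : Int) (width : Int) (height : Int) (out : List (List (String × Int))) : Decidable (Spec_build_regions_py positions x_offset width height out) := by unfold Spec_build_regions_py; infer_instance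

-- ===== CLAIM (what is proved, stated in full; the proofs are below) =====
def Claim_equal_build_regions_py : Prop := ∀ (positions : List Int) (x_offset : Int) (width : Int) (height : Int), Dom_build_regions_py positions x_offset width height → Spec_build_regions_py positions x_offset width height (build_regions_py positions x_offset width height)

-- ===== LEMMAS AND PROOFS =====

-- the common "zip-with-successor" reference form both ports are proved equal to
def zipForm (positions : List Int) (x_offset : Int) (width : Int) (height : Int) : List (List (String × Int)) :=
  (positions.zip (positions.drop 1 ++ [height])).map
    (fun p => [("x", x_offset), ("y", p.1), ("w", width), ("h", p.2 - p.1)])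

theorem a_eq_zipForm (positions : List Int) (x_offset width height : Int) :
    build_regions_py positions x_offset width height
      = zipForm positions x_offset width height := by
  unfold build_regions_py zipForm
  by_cases h : positions = []
  · simp [h]
  · simp only [if_neg h]
    rw [PySem.List.foldl_append_singleton_eq_map]
    simp only [List.nil_append]
    apply List.ext_getElem
    · simp [PySem.List.length_enumerate, List.length_zip]
      have : 0 < positions.length := List.length_pos_iff.mpr h
      omega
    · intro i hi₁ hi₂
      simp only [List.getElem_map, PySem.List.getElem_enumerate, List.getElem_zip]
      have hi : i < positions.length := by
        simpa [PySem.List.length_enumerate] using hi₁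
      congr 1
      have hends : (positions.drop 1 ++ [height])[i]'(by
          simp; omega) =
          if (i : Int) < (positions.length : Int) - 1 then
            PySem.List.pyGetD positions ((i : Int) + 1) 0
          else height := by
        by_cases hlt : i < positions.length - 1
        · rw [List.getElem_append_left (by simp; omega)]
          rw [List.getElem_drop]
          rw [if_pos (by omega)]
          have : ((i : Int) + 1) = ((i + 1 : Nat) : Int) := by push_cast; ring
          rw [this, PySem.List.pyGetD_natCast]
          rw [List.getD_eq_getElem _ _ (by omega)]
          congr 1
          omega
        · rw [if_neg (by omega)]
          have hi' : i = positions.length - 1 := by omega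
          rw [List.getElem_append_right (by simp; omega)]
          simp
      simp only [hends]
      by_cases hlt : (i : Int) < (positions.length : Int) - 1 <;>
        simp [hlt, zero_add]

-- the foldr view of B's loop, proved jointly: final boundary = head (or height), output = zipForm
theorem b_foldr_inv (positions : List Int) (x_offset width height : Int) :
    (positions.foldr
        (fun y (s : Int × List (List (String × Int))) =>
          (y, s.2 ++ [[("x", x_offset), ("y", y), ("w", width), ("h", s.1 - y)]]))
        (height, [])).1 = positions.headD height ∧
    (positions.foldr
        (fun y (s : Int × List (List (String × Int))) =>
          (y, s.2 ++ [[("x", x_offset), ("y", y), ("w", width), ("h", s.1 - y)]]))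
        (height, [])).2.reverse = zipForm positions x_offset width height := by
  induction positions with
  | nil => simp [zipForm]
  | cons y rest ih =>
    obtain ⟨ih1, ih2⟩ := ih
    refine ⟨rfl, ?_⟩
    simp only [List.foldr_cons, List.reverse_append, List.reverse_cons, List.reverse_nil]
    rw [ih1, ih2]
    cases rest with
    | nil => simp [zipForm]
    | cons r rs => simp [zipForm]

theorem b_eq_zipForm (positions : List Int) (x_offset width height : Int) :
    build_regions_py_alt positions x_offset width height
      = zipForm positions x_offset width height := by
  unfold build_regions_py_alt
  rw [List.foldl_reverse]
  exact (b_foldr_inv positions x_offset width height).2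

-- ===== VERDICT (by name: the statement is the Claim_ definition above) =====
theorem build_regions_py_spec : Claim_equal_build_regions_py := by
  intro positions x_offset width height _
  unfold Spec_build_regions_py
  rw [a_eq_zipForm, b_eq_zipForm]
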